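-- pv_equiv track=rewrite | github.com/GioZulber/uni-python | Tp6-Funciones/ej-11.py | extractDigit
-- ===== SOURCE A (Python) =====
-- def extractDigit(num, index):
--     i = 0
--     while num > 0:
--         digit = num % 10
--         num = num // 10
--         if index == i:
--             return digit
--         else:
--             i = i + 1
--     return -1
-- ===== SOURCE B (Python) =====
-- def extractDigit(num, index):
--     if num <= 0 or index < 0:
--         return -1
--     s = str(num)
--     if index >= len(s):
--         return -1
--     return int(s[len(s) - 1 - index])
-- ===== Notes on version B (the rewrite author's own statement) =====
-- stated objective: simpler
-- what changed: Replaced the digit-by-digit modular while-loop with a single str() conversion and direct right-to-left indexing into the decimal string.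
import Mathlib
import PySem

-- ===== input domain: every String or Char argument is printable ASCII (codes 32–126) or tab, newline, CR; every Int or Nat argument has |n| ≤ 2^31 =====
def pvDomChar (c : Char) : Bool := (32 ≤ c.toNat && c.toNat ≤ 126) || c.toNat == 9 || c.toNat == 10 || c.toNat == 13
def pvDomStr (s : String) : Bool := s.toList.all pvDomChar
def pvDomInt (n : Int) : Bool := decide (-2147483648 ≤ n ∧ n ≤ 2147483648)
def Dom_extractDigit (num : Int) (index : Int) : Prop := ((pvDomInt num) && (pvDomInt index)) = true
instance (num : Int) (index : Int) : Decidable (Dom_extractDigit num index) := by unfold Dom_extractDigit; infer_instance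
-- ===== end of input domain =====

-- B replaces A's modular while-loop by str() conversion and direct right-to-left indexing (simpler decomposition, same cost).


-- ===== PORT A =====
-- A's while-loop: state (num, i); returns the digit when index == i, else -1 after num is exhausted
def extractDigitLoop (num index i : Int) : Int :=
  if h : 0 < num then
    let digit := PySem.Int.mod num 10
    let num' := PySem.Int.floordiv num 10
    if index = i then digit
    else extractDigitLoop num' index (i + 1)
  else -1
termination_by num.toNat
decreasing_by
  have h10 : PySem.Int.floordiv num 10 = num / 10 := PySem.Int.floordiv_eq_ediv_of_pos (by omega)
  simp only [h10]
  omega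

def extractDigit (num : Int) (index : Int) : Int := extractDigitLoop num index 0

-- ===== PORT B =====
def extractDigit_alt (num : Int) (index : Int) : Int :=
  if num ≤ 0 ∨ index < 0 then -1
  else
    let s := PySem.Int.toStr num
    if PySem.Str.len s ≤ index then -1
    else
      match PySem.Str.pyGet? s (PySem.Str.len s - 1 - index) with
      | some c => (PySem.Int.ofChars? [c]).getD (-1)
      | none => -1

-- ===== PRECONDITION & SPEC =====
def Spec_extractDigit (num : Int) (index : Int) (out : Int) : Prop := out = extractDigit_alt num index
instance (num : Int) (index : Int) (out : Int) : Decidable (Spec_extractDigit num index out) := by unfold Spec_extractDigit; infer_instance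

-- ===== CLAIM (what is proved, stated in full; the proofs are below) =====
def Claim_equal_extractDigit : Prop := ∀ (num : Int) (index : Int), Dom_extractDigit num index → Spec_extractDigit num index (extractDigit num index)

-- ===== LEMMAS AND PROOFS =====

-- A's loop computes num / 10^(index-i) % 10 when that digit exists, else -1
theorem extractDigitLoop_eq (num index i : Int) :
    extractDigitLoop num index i =
      if 0 < num ∧ i ≤ index ∧ (10 : Int) ^ (index - i).toNat ≤ num then
        num / 10 ^ (index - i).toNat % 10
      else -1 := by
  induction num, i using extractDigitLoop.induct index with
  | case1 num h =>
    rw [extractDigitLoop]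
    simp only [dif_pos h, if_true]
    have h0 : (index - index).toNat = 0 := by omega
    rw [h0]
    simp only [pow_zero]
    rw [if_pos (show 0 < num ∧ index ≤ index ∧ (1:Int) ≤ num by omega), Int.ediv_one,
      PySem.Int.mod_eq_emod_of_pos (by omega)]
  | case2 num i h _nv heq IH =>
    rw [extractDigitLoop]
    simp only [dif_pos h, if_neg heq]
    have h10 : PySem.Int.floordiv num 10 = num / 10 := PySem.Int.floordiv_eq_ediv_of_pos (by omega)
    have hnv : _nv = num / 10 := h10
    rw [hnv] at IH
    rw [h10]
    rcases lt_or_gt_of_ne (fun hc => heq hc.symm) with hgt | hlt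
    · -- i < index
      have hk : (index - i).toNat = (index - (i+1)).toNat + 1 := by omega
      set k : ℕ := (index - (i+1)).toNat with hkdef
      rw [IH, hk]
      have hbr : (10:Int)^k ≤ num / 10 ↔ (10:Int)^(k+1) ≤ num := by
        rw [Int.le_ediv_iff_mul_le (by omega : (0:Int) < 10), pow_succ]
      have hdd : num / 10 / 10^k = num / 10^(k+1) := by
        rw [Int.ediv_ediv_of_nonneg (show (0:Int) ≤ 10 by norm_num), ← pow_succ']
      by_cases hc : (10:Int)^(k+1) ≤ num
      · have hpos : 0 < num / 10 := by
          have h1 : (1:Int) ≤ 10^k := one_le_pow₀ (by omega)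
          have h2 := hbr.mpr hc
          omega
        rw [if_pos ⟨hpos, by omega, hbr.mpr hc⟩, if_pos ⟨h, by omega, hc⟩, hdd]
      · rw [if_neg (by rw [hbr]; tauto), if_neg (by tauto)]
    · -- index < i : both sides -1
      rw [IH]
      rw [if_neg (by rintro ⟨h1, h2, h3⟩; omega), if_neg (by rintro ⟨h1, h2, h3⟩; omega)]
  | case3 num i h =>
    rw [extractDigitLoop]
    simp only [dif_neg h]
    rw [if_neg (by tauto)]

-- Nat.toDigits via Nat.digits (most significant digit first)
theorem toDigitsCore_eq (fuel n : ℕ) (ds : List Char) (hf : n < fuel) (hn : 0 < n) :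
    Nat.toDigitsCore 10 fuel n ds = ((Nat.digits 10 n).reverse.map Nat.digitChar) ++ ds := by
  induction fuel generalizing n ds with
  | zero => omega
  | succ fuel IH =>
    rw [Nat.toDigitsCore]
    have hdig : Nat.digits 10 n = n % 10 :: Nat.digits 10 (n / 10) :=
      Nat.digits_def' (by omega) hn
    by_cases hz : n / 10 = 0
    · simp only [hz, if_pos rfl]
      rw [hdig, hz]
      simp
    · rw [if_neg hz]
      rw [IH (n / 10) _ (by omega) (by omega)]
      rw [hdig]
      simp

theorem toDigits_eq (n : ℕ) (hn : 0 < n) :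
    Nat.toDigits 10 n = (Nat.digits 10 n).reverse.map Nat.digitChar := by
  rw [Nat.toDigits, toDigitsCore_eq (n + 1) n [] (by omega) hn, List.append_nil]

-- int() of a single decimal digit character
theorem ofChars_digitChar (d : ℕ) (hd : d < 10) :
    PySem.Int.ofChars? [Nat.digitChar d] = some (d : Int) := by
  interval_cases d <;> decide

theorem extractDigit_eq_alt (num index : Int) : extractDigit num index = extractDigit_alt num index := by
  rw [extractDigit, extractDigitLoop_eq]
  by_cases hg : num ≤ 0 ∨ index < 0
  · rw [if_neg (by rintro ⟨h1, h2, h3⟩; omega), extractDigit_alt, if_pos hg]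
  · push_neg at hg
    obtain ⟨hnum, hidx⟩ := hg
    have hpos : 0 < num := by omega
    set n : ℕ := num.toNat with hn
    have hncast : (n : Int) = num := by omega
    have hnpos : 0 < n := by omega
    set k : ℕ := index.toNat with hk
    have hkcast : (k : Int) = index := by omega
    have hsub : (index - 0).toNat = k := by omega
    have hchars : PySem.Int.toStr num = String.ofList ((Nat.digits 10 n).reverse.map Nat.digitChar) := by
      rw [PySem.Int.toStr, PySem.Int.toChars, if_neg (by omega), toDigits_eq n hnpos]
    set L : ℕ := (Nat.digits 10 n).length with hL
    have hlen : PySem.Str.len (PySem.Int.toStr num) = (L : Int) := by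
      rw [hchars, PySem.Str.len_eq, String.toList_ofList, List.length_map, List.length_reverse]
    by_cases hout : L ≤ k
    · -- index out of range: both sides -1
      rw [if_neg (by
          rintro ⟨h1, h2, h3⟩
          rw [hsub, ← hncast] at h3
          have h4 : (10 : ℕ) ^ k ≤ n := by exact_mod_cast h3
          have h5 := (Nat.lt_digits_length_iff (by omega) n).mpr h4
          omega)]
      rw [extractDigit_alt, if_neg (by omega), if_pos (by rw [hlen]; omega)]
    · push_neg at hout
      have hle : (10 : ℕ) ^ k ≤ n := (Nat.lt_digits_length_iff (by omega) n).mp hout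
      have hleZ : (10 : Int) ^ k ≤ num := by
        rw [← hncast]; exact_mod_cast hle
      rw [if_pos ⟨hpos, by omega, by rw [hsub]; exact hleZ⟩, hsub]
      rw [extractDigit_alt, if_neg (by omega), if_neg (by rw [hlen]; omega)]
      have hidx2 : PySem.Str.len (PySem.Int.toStr num) - 1 - index = ((L - 1 - k : ℕ) : Int) := by
        rw [hlen]; omega
      rw [hidx2, hchars, PySem.Str.pyGet?_natCast, String.toList_ofList]
      have hlt : L - 1 - k < ((Nat.digits 10 n).reverse.map Nat.digitChar).length := by
        rw [List.length_map, List.length_reverse]; omega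
      have hkL : k < (Nat.digits 10 n).length := by omega
      have helem : ((Nat.digits 10 n).reverse.map Nat.digitChar)[L - 1 - k]'hlt =
          Nat.digitChar (n / 10 ^ k % 10) := by
        rw [List.getElem_map, List.getElem_reverse]
        have hgd := Nat.getD_digits n k (b := 10) (by norm_num)
        rw [List.getD_eq_getElem?_getD, List.getElem?_eq_getElem hkL, Option.getD_some] at hgd
        have hik : (Nat.digits 10 n).length - 1 - (L - 1 - k) = k := by omega
        simp only [hik]
        rw [hgd]
      have hget : ((Nat.digits 10 n).reverse.map Nat.digitChar)[L - 1 - k]? =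
          some (Nat.digitChar (n / 10 ^ k % 10)) := by
        rw [List.getElem?_eq_getElem hlt, helem]
      rw [hget]
      show num / 10 ^ k % 10 = (PySem.Int.ofChars? [Nat.digitChar (n / 10 ^ k % 10)]).getD (-1)
      rw [ofChars_digitChar _ (Nat.mod_lt _ (by omega)), Option.getD_some]
      push_cast
      rw [hncast]

-- ===== VERDICT (by name: the statement is the Claim_ definition above) =====
theorem extractDigit_spec : Claim_equal_extractDigit := by
  intro num index _
  exact extractDigit_eq_alt num index
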